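-- pv_equiv track=rewrite | github.com/societe-generale/aikit | aikit/ml_machine/model_graph.py | _create_name_mapping
-- ===== SOURCE A (Python) =====
-- def _create_name_mapping(all_nodes):
--     """ helper function to creates the name of the nodes within a GraphPipeline model
--     - if no ambiguities, name of node will be name of model
--     - otherwise, name of node will be '%s_%s' % (name_of_step,name_of_model)
--
--
--     Parameters
--     ----------
--     all_nodes : list of 2-uple
--         nodes of graph : (step_name, model_name)
--
--     Returns
--     -------
--     dictionnary with key = node, and value : string corresponding to the node
--     """
--
--     count_by_model_name = dict()
--     mapping = {}
--     done = set()
--     for step_name, model_name in all_nodes: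
--         if (step_name, model_name) in done:
--             raise ValueError("I have a duplicate node %s" % str((step_name, model_name)))
--         done.add((step_name, model_name))
--
--         count_by_model_name[model_name[1]] = count_by_model_name.get(model_name[1], 0) + 1
--
--     for step_name, model_name in all_nodes:
--         if count_by_model_name[model_name[1]] > 1:
--             mapping[(step_name, model_name)] = "%s_%s" % (model_name[0], model_name[1])
--         else:
--             mapping[(step_name, model_name)] = model_name[1]
--
--     count_by_name = dict()
--     for k, v in mapping.items():
--         count_by_name[k] = count_by_model_name.get(k, 0) + 1
--     for k, v in count_by_name.items():
--         if v > 1: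
--             raise ValueError("I have duplicate name for node %s" % str(k))
--
--     return mapping
-- ===== SOURCE B (Python) =====
-- def _create_name_mapping(all_nodes):
--     if len(set(all_nodes)) != len(all_nodes):
--         dup = next(n for i, n in enumerate(all_nodes) if n in all_nodes[:i])
--         raise ValueError("I have a duplicate node %s" % str(dup))
--     names = sorted(model[1] for _, model in all_nodes)
--     ambiguous = {a for a, b in zip(names, names[1:]) if a == b}
--     return {(step, model): ("%s_%s" % (model[0], model[1]) if model[1] in ambiguous else model[1])
--             for step, model in all_nodes}
-- ===== Notes on version B (the rewrite author's own statement) =====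
-- stated objective: alternative
-- what changed: Ambiguous model names are found by sorting the list of names and scanning adjacent equal pairs (sort-then-scan) instead of A's counting dict, duplicate nodes are detected by a single len(set(..)) cardinality check instead of A's seen-set loop, the mapping is emitted as one dict comprehension, and A's dead final block (a str-keyed dict probed with tuple keys, so the second raise never fires) is dropped.
import Mathlib
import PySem

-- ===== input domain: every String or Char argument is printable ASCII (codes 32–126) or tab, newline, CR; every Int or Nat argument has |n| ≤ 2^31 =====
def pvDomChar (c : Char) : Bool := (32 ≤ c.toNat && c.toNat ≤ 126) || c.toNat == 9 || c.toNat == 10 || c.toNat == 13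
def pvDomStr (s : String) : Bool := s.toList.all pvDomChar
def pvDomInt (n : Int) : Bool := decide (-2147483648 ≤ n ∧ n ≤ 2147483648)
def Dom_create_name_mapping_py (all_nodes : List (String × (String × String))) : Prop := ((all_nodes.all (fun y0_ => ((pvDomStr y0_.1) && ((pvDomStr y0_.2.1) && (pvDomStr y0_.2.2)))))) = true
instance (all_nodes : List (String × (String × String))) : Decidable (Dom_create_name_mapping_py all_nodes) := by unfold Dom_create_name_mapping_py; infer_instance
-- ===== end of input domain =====

-- B finds ambiguous model names by sorting the name list and scanning adjacent equal pairs
-- (sort-then-scan) instead of A's counting dict, checks duplicate nodes by one len(set(..))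
-- cardinality test, and drops A's dead final block; alternative algorithm, same behaviour on Pre_.
-- In both ports a returned dict item ((step, model), label) is emitted in the flattened form
-- (step, model, label) that the required return type states.

-- ===== PORT A =====
-- first loop of A: done-set + count dict; the 'raise ValueError' on a duplicate node is 'none'
def aLoop1 : List (String × String × String) → PySem.Set (String × String × String) →
    PySem.Dict String Int → Option (PySem.Dict String Int)
  | [], _, cnt => some cnt
  | n :: rest, done, cnt =>
      if PySem.Set.contains done n then none
      else aLoop1 rest (PySem.Set.add done n) (cnt.insert n.2.2 (cnt.getD n.2.2 0 + 1))

-- second loop of A: build the mapping dict in all_nodes order (items flattened per the type convention)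
def aBody (all_nodes : List (String × (String × String))) (cnt : PySem.Dict String Int) :
    List (String × (String × String) × String) :=
  ((all_nodes.foldl
      (fun (m : PySem.Dict (String × String × String) String) n =>
        if cnt.getD n.2.2 0 > 1 then m.insert n (n.2.1 ++ "_" ++ n.2.2)
        else m.insert n n.2.2)
      PySem.Dict.empty).items).map (fun p => (p.1.1, p.1.2, p.2))

def create_name_mapping_py (all_nodes : List (String × (String × String))) : List (String × (String × String) × String) :=
  match aLoop1 all_nodes PySem.Set.empty PySem.Dict.empty with
  | none => []  -- ValueError: excluded by Pre_
  | some cnt => aBody all_nodes cnt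
  -- A's final block is a no-op: count_by_name[k] = count_by_model_name.get(k, 0) + 1 probes a
  -- str-keyed dict with tuple keys, so .get always returns 0, every v is 1 and the second
  -- 'raise' never fires; this heterogeneous lookup is not typeable and is ported as the no-op it is.

-- ===== PORT B =====
def create_name_mapping_py_alt (all_nodes : List (String × (String × String))) : List (String × (String × String) × String) :=
  if (PySem.Set.ofList all_nodes).length ≠ all_nodes.length then
    []  -- ValueError on a duplicate node: excluded by Pre_
  else
    let names := PySem.List.sorted (all_nodes.map (fun n => n.2.2)) (fun x => x) false
    let ambiguous : PySem.Set String :=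
      PySem.Set.ofList (((names.zip names.tail).filter (fun p => p.1 == p.2)).map (·.1))
    all_nodes.map (fun n =>
      (n.1, n.2, if PySem.Set.contains ambiguous n.2.2 then n.2.1 ++ "_" ++ n.2.2 else n.2.2))

-- ===== PRECONDITION & SPEC =====
-- Pre_ excludes lists with a duplicate node, on which A raises ValueError.
def Pre_create_name_mapping_py (all_nodes : List (String × (String × String))) : Prop :=
  all_nodes.Nodup
instance (all_nodes : List (String × (String × String))) : Decidable (Pre_create_name_mapping_py all_nodes) := by unfold Pre_create_name_mapping_py; infer_instance

def pvWitness_create_name_mapping_py : (List (String × (String × String))) :=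
  [("s1", ("A", "m")), ("s2", ("B", "m")), ("s3", ("C", "k"))]

def Spec_create_name_mapping_py (all_nodes : List (String × (String × String))) (out : List (String × (String × String) × String)) : Prop := out = create_name_mapping_py_alt all_nodes
instance (all_nodes : List (String × (String × String))) (out : List (String × (String × String) × String)) : Decidable (Spec_create_name_mapping_py all_nodes out) := by unfold Spec_create_name_mapping_py; infer_instance

-- ===== CLAIM (what is proved, stated in full; the proofs are below) =====
def Claim_equal_create_name_mapping_py : Prop := ∀ (all_nodes : List (String × (String × String))), Dom_create_name_mapping_py all_nodes → Pre_create_name_mapping_py all_nodes → Spec_create_name_mapping_py all_nodes (create_name_mapping_py all_nodes)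

-- ===== LEMMAS AND PROOFS =====

-- A's first loop on a duplicate-free list never raises and is the plain counting fold
theorem aLoop1_nodup (ns : List (String × String × String))
    (done : PySem.Set (String × String × String)) (cnt : PySem.Dict String Int)
    (hnd : ns.Nodup) (hdisj : ∀ n ∈ ns, n ∉ done) :
    aLoop1 ns done cnt =
      some (ns.foldl (fun c n => c.insert n.2.2 (c.getD n.2.2 0 + 1)) cnt) := by
  induction ns generalizing done cnt with
  | nil => rfl
  | cons n rest ih =>
      have hn : n ∉ done := hdisj n (by simp)
      simp only [aLoop1]
      rw [if_neg (by simpa [PySem.Set.contains_iff] using hn)]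
      rw [ih _ _ hnd.of_cons]
      · simp [List.foldl_cons]
      · intro m hm
        have : m ≠ n := fun h => (List.nodup_cons.mp hnd).1 (h ▸ hm)
        simp only [PySem.Set.mem_add]
        rintro (h | h)
        · exact hdisj m (by simp [hm]) h
        · exact this h

-- in a ≤-sorted list, some adjacent pair equals x ↔ x occurs at least twice
theorem adj_dup_iff_two_le_count (l : List String) (hs : l.Pairwise (· ≤ ·)) (x : String) :
    (∃ p ∈ l.zip l.tail, p.1 = p.2 ∧ p.1 = x) ↔ 2 ≤ l.count x := by
  induction l with
  | nil => simp
  | cons a t ih =>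
      cases t with
      | nil =>
          constructor
          · rintro ⟨p, hp, -⟩; simp at hp
          · intro h
            exfalso
            have : List.count x [a] ≤ 1 := by
              by_cases hax : a = x <;> simp [hax]
            omega
      | cons b t' =>
          have h1 := List.pairwise_cons.mp hs
          have hab : a ≤ b := h1.1 b (by simp)
          have hst : (b :: t').Pairwise (· ≤ ·) := h1.2
          have hbt : ∀ y ∈ t', b ≤ y := (List.pairwise_cons.mp hst).1
          rw [List.count_cons]
          constructor
          · rintro ⟨p, hp, h12, h1x⟩
            rcases List.mem_cons.mp (by simpa using hp) with heq | hp'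
            · -- the head pair (a, b): a = b = x gives two occurrences
              have ha : a = x := by rw [heq] at h1x; exact h1x
              have hb : b = x := by
                rw [heq] at h12; exact h12.symm.trans ha
              have hone : 1 ≤ (b :: t').count x := by
                rw [List.count_cons]; simp [hb]
              simp only [ha, beq_self_eq_true, if_true]
              omega
            · have := (ih hst).mp ⟨p, hp', h12, h1x⟩
              split <;> omega
          · intro hc
            by_cases hax : a = x
            · -- x at the head; sortedness forces b = x, so the head pair is a duplicate
              subst hax
              simp only [beq_self_eq_true, if_true] at hc
              have hmem : a ∈ b :: t' := List.count_pos_iff.mp (by omega)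
              have hba : b = a := by
                rcases List.mem_cons.mp hmem with h | h
                · exact h.symm
                · exact le_antisymm (hbt a h) hab
              exact ⟨(a, b), by simp, by simpa using hba.symm, rfl⟩
            · have hc' : 2 ≤ (b :: t').count x := by
                have : (a == x) = false := by simpa using hax
                rw [this] at hc; simpa using hc
              obtain ⟨p, hp, h12, h1x⟩ := (ih hst).mpr hc'
              exact ⟨p, by
                simp only [List.tail_cons, List.zip_cons_cons]
                exact List.mem_cons_of_mem _ (by simpa using hp), h12, h1x⟩

-- B's ambiguous-set membership is 'the name occurs at least twice among the model names'
theorem ambiguous_iff (all_nodes : List (String × (String × String))) (x : String) :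
    (let names := PySem.List.sorted (all_nodes.map (fun n => n.2.2)) (fun x => x) false
     PySem.Set.contains
       (PySem.Set.ofList (((names.zip names.tail).filter (fun p => p.1 == p.2)).map (·.1))) x = true)
      ↔ 2 ≤ (all_nodes.map (fun n => n.2.2)).count x := by
  set ns := all_nodes.map (fun n => n.2.2) with hns
  set names := PySem.List.sorted ns (fun x => x) false with hnames
  have hsorted : names.Pairwise (· ≤ ·) := PySem.List.sorted_pairwise ns (fun x => x)
  have hperm : names.Perm ns := PySem.List.sorted_perm ns (fun x => x) false
  rw [show (ns.count x) = names.count x from (hperm.count_eq x).symm]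
  rw [PySem.Set.contains_iff, PySem.Set.mem_ofList]
  rw [← adj_dup_iff_two_le_count names hsorted x]
  constructor
  · intro h
    simp only [List.mem_map, List.mem_filter] at h
    obtain ⟨p, ⟨hp, heq⟩, h1x⟩ := h
    exact ⟨p, hp, by simpa using heq, h1x⟩
  · rintro ⟨p, hp, h12, h1x⟩
    simp only [List.mem_map, List.mem_filter]
    exact ⟨p, ⟨hp, by simpa using h12⟩, h1x⟩

-- the counting dict of A's first loop computes the count of each name
theorem aCount_getD (all_nodes : List (String × (String × String))) (x : String) :
    (all_nodes.foldl (fun c n => c.insert n.2.2 (c.getD n.2.2 0 + 1))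
        (PySem.Dict.empty : PySem.Dict String Int)).getD x 0
      = ((all_nodes.map (fun n => n.2.2)).count x : Int) := by
  rw [← List.foldl_map (f := fun n : String × String × String => n.2.2)
        (g := fun (c : PySem.Dict String Int) x => c.insert x (c.getD x 0 + 1))]
  rw [PySem.Dict.getD_foldl_insert_add_one]
  simp [PySem.Dict.getD_empty]

-- ===== VERDICT (by name: the statement is the Claim_ definition above) =====
theorem create_name_mapping_py_spec : Claim_equal_create_name_mapping_py := by
  intro all_nodes _ hpre
  unfold Spec_create_name_mapping_py create_name_mapping_py create_name_mapping_py_alt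
  rw [aLoop1_nodup all_nodes _ _ hpre (by simp [PySem.Set.empty])]
  rw [if_neg (by rw [PySem.Set.ofList_eq_self_of_nodup all_nodes hpre]; simp)]
  dsimp only
  show aBody all_nodes _ = _
  unfold aBody
  rw [PySem.List.foldl_congr_mem all_nodes _
        (fun (m : PySem.Dict (String × String × String) String) n =>
          m.insert n (if (all_nodes.foldl (fun c n => c.insert n.2.2 (c.getD n.2.2 0 + 1))
              (PySem.Dict.empty : PySem.Dict String Int)).getD n.2.2 0 > 1
            then n.2.1 ++ "_" ++ n.2.2 else n.2.2))
        PySem.Dict.empty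
        (by intro acc n _; exact (apply_ite (acc.insert n) _ _ _).symm)]
  rw [PySem.Dict.items_foldl_insert_fresh all_nodes (fun n => n)
        (fun n => if (all_nodes.foldl (fun c n => c.insert n.2.2 (c.getD n.2.2 0 + 1))
              (PySem.Dict.empty : PySem.Dict String Int)).getD n.2.2 0 > 1
            then n.2.1 ++ "_" ++ n.2.2 else n.2.2)
        PySem.Dict.empty
        (by intro a _; simp [PySem.Dict.contains_empty]) (by simpa using hpre)]
  have hie : (PySem.Dict.empty : PySem.Dict (String × String × String) String).items = [] := rfl
  rw [hie, List.nil_append, List.map_map]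
  apply List.map_congr_left
  intro n _
  simp only [Function.comp]
  congr 1
  congr 1
  simp only [aCount_getD]
  by_cases h2 : 2 ≤ (all_nodes.map (fun n => n.2.2)).count n.2.2
  · rw [if_pos (by omega), if_pos ((ambiguous_iff all_nodes n.2.2).mpr h2)]
  · rw [if_neg (by omega), if_neg (by rw [ambiguous_iff all_nodes n.2.2]; exact h2)]
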